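-- pv_equiv track=rewrite | github.com/devin-fisher/treadstone | lib/timeline_analysis/image_clip_copy.py | get_number_games
-- ===== SOURCE A (Python) =====
-- def get_number_games(report_info):
--     number_games = 0
--     for a in range(1,6):
--         check = True
--         for b in range(0, len(report_info['infographics'])):
--             infographic = report_info['infographics'][b]
--             if (infographic[1:2] == str(a) and check == True):
--                 number_games = number_games + 1
--                 check = False
--
--
--     return number_games
-- ===== SOURCE B (Python) =====
-- def get_number_games(report_info):
--     digits = {'1', '2', '3', '4', '5'}
--     seen = set()
--     for el in report_info['infographics']:
--         s = el[1:2]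
--         if s in digits:
--             seen.add(s)
--     return len(seen)
-- ===== Notes on version B (the rewrite author's own statement) =====
-- stated objective: idiomatic
-- what changed: Instead of five repeated scans (one per digit with a per-digit 'check' flag), B makes one pass collecting the distinct matching second-character slices into a set and returns its size.
import Mathlib
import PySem

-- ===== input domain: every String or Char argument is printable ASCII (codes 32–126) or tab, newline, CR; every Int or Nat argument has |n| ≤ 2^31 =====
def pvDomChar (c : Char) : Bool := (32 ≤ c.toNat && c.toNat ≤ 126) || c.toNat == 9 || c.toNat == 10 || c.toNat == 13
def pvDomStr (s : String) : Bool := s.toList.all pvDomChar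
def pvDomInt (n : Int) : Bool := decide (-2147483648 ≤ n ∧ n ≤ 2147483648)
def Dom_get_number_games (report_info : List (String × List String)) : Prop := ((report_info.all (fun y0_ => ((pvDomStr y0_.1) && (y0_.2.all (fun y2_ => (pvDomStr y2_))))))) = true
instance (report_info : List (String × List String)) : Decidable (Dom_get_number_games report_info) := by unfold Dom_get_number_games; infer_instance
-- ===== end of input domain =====

-- B replaces A's five per-digit scans (each with a 'check' flag) by one pass that collects
-- the distinct matching second-character slices into a set and returns its size (idiomatic).


-- ===== PORT A =====
def get_number_games (report_info : List (String × List String)) : Int :=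
  let infos := (PySem.Dict.mk report_info).getD "infographics" []
  (PySem.List.pyRange 1 6 1).foldl (fun number_games a =>
    ((PySem.List.pyRange 0 (infos.length : Int) 1).foldl
      (fun (st : Int × Bool) b =>
        let infographic := PySem.List.pyGetD infos b ""
        if (PySem.Str.slice infographic (some 1) (some 2) == PySem.Int.toStr a) && (st.2 == true)
        then (st.1 + 1, false) else st)
      (number_games, true)).1) 0

-- ===== PORT B =====
def get_number_games_alt (report_info : List (String × List String)) : Int :=
  let digits : PySem.Set String := PySem.Set.ofList ["1", "2", "3", "4", "5"]
  let seen : PySem.Set String :=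
    ((PySem.Dict.mk report_info).getD "infographics" []).foldl
      (fun seen el =>
        let s := PySem.Str.slice el (some 1) (some 2)
        if digits.contains s then seen.add s else seen)
      PySem.Set.empty
  PySem.Set.len seen

-- ===== PRECONDITION & SPEC =====
-- Pre_ excludes exactly the inputs without an "infographics" key, where Python A raises KeyError.
def Pre_get_number_games (report_info : List (String × List String)) : Prop :=
  (PySem.Dict.mk report_info).contains "infographics" = true
instance (report_info : List (String × List String)) : Decidable (Pre_get_number_games report_info) := by unfold Pre_get_number_games; infer_instance
def pvWitness_get_number_games : (List (String × List String)) := [("infographics", ["x1y", "a2"])]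

def Spec_get_number_games (report_info : List (String × List String)) (out : Int) : Prop := out = get_number_games_alt report_info
instance (report_info : List (String × List String)) (out : Int) : Decidable (Spec_get_number_games report_info out) := by unfold Spec_get_number_games; infer_instance

-- ===== CLAIM (what is proved, stated in full; the proofs are below) =====
def Claim_equal_get_number_games : Prop := ∀ (report_info : List (String × List String)), Dom_get_number_games report_info → Pre_get_number_games report_info → Spec_get_number_games report_info (get_number_games report_info)

-- ===== LEMMAS AND PROOFS =====

-- the second-character slice that both programs compare
def pvSlice (el : String) : String := PySem.Str.slice el (some 1) (some 2)

-- A's inner loop, as a fold over the list of infographics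
def pvInner (d : String) (st : Int × Bool) (el : String) : Int × Bool :=
  if (pvSlice el == d) && (st.2 == true) then (st.1 + 1, false) else st

lemma pvInner_false (xs : List String) (d : String) (n : Int) :
    xs.foldl (pvInner d) (n, false) = (n, false) := by
  induction xs with
  | nil => rfl
  | cons x xs ih => simp [pvInner, ih]

lemma pvInner_spec (xs : List String) (d : String) (n : Int) :
    (xs.foldl (pvInner d) (n, true)).1 =
      n + (if xs.any (fun el => pvSlice el == d) then 1 else 0) := by
  induction xs generalizing n with
  | nil => simp
  | cons x xs ih =>
    by_cases h : pvSlice x == d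
    · simp [pvInner, h, pvInner_false]
    · simp [pvInner, h, ih]

-- B's loop: membership in the accumulated set
lemma pvSeen_mem (xs : List String) (y : String) :
    ∀ (s0 : PySem.Set String),
    (y ∈ xs.foldl (fun seen el =>
        if (PySem.Set.ofList ["1", "2", "3", "4", "5"]).contains (pvSlice el)
        then seen.add (pvSlice el) else seen) s0) ↔
      y ∈ s0 ∨ (y ∈ (["1", "2", "3", "4", "5"] : List String) ∧ ∃ el ∈ xs, pvSlice el = y) := by
  induction xs with
  | nil => simp
  | cons x xs ih =>
    intro s0
    simp only [List.foldl_cons]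
    by_cases h : pvSlice x ∈ (["1", "2", "3", "4", "5"] : List String)
    · have hc : (PySem.Set.ofList ["1", "2", "3", "4", "5"]).contains (pvSlice x) = true := by
        rw [PySem.Set.contains_iff, PySem.Set.mem_ofList]; exact h
      rw [if_pos hc, ih]
      simp only [PySem.Set.mem_add, List.exists_mem_cons_iff]
      constructor
      · rintro (h1 | ⟨hD, el, hel, hsl⟩)
        · rcases h1 with h1 | rfl
          · exact Or.inl h1
          · exact Or.inr ⟨h, Or.inl rfl⟩
        · exact Or.inr ⟨hD, Or.inr ⟨el, hel, hsl⟩⟩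
      · rintro (h1 | ⟨hD, hsl | ⟨el, hel, hsl⟩⟩)
        · exact Or.inl (Or.inl h1)
        · exact Or.inl (Or.inr hsl.symm)
        · exact Or.inr ⟨hD, el, hel, hsl⟩
    · have hc : (PySem.Set.ofList ["1", "2", "3", "4", "5"]).contains (pvSlice x) = false := by
        rw [Bool.eq_false_iff, ne_eq, PySem.Set.contains_iff, PySem.Set.mem_ofList]; exact h
      rw [hc, if_neg Bool.false_ne_true, ih]
      simp only [List.exists_mem_cons_iff]
      constructor
      · rintro (h1 | ⟨hD, el, hel, hsl⟩)
        · exact Or.inl h1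
        · exact Or.inr ⟨hD, Or.inr ⟨el, hel, hsl⟩⟩
      · rintro (h1 | ⟨hD, hsl | ⟨el, hel, hsl⟩⟩)
        · exact Or.inl h1
        · exact absurd (hsl ▸ hD) h
        · exact Or.inr ⟨hD, el, hel, hsl⟩

lemma pvSeen_nodup (xs : List String) (s0 : PySem.Set String) (h0 : s0.Nodup) :
    (xs.foldl (fun seen el =>
        if (PySem.Set.ofList ["1", "2", "3", "4", "5"]).contains (pvSlice el)
        then seen.add (pvSlice el) else seen) s0).Nodup := by
  induction xs generalizing s0 with
  | nil => exact h0
  | cons x xs ih =>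
    simp only [List.foldl_cons]
    split
    · exact ih _ (PySem.Set.nodup_add s0 _ h0)
    · exact ih _ h0

-- the core fact, for an arbitrary list of infographics
lemma pvCore (infos : List String) :
    (PySem.List.pyRange 1 6 1).foldl (fun number_games a =>
      ((PySem.List.pyRange 0 (infos.length : Int) 1).foldl
        (fun (st : Int × Bool) b =>
          let infographic := PySem.List.pyGetD infos b ""
          if (PySem.Str.slice infographic (some 1) (some 2) == PySem.Int.toStr a) && (st.2 == true)
          then (st.1 + 1, false) else st)
        (number_games, true)).1) 0 =
    PySem.Set.len (infos.foldl (fun seen el =>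
        if (PySem.Set.ofList ["1", "2", "3", "4", "5"]).contains (pvSlice el)
        then seen.add (pvSlice el) else seen) PySem.Set.empty) := by
  -- A's side: index loop → list fold, then the per-digit inner-loop characterisation
  have hinner : ∀ (a : Int) (n : Int),
      ((PySem.List.pyRange 0 (infos.length : Int) 1).foldl
        (fun (st : Int × Bool) b =>
          let infographic := PySem.List.pyGetD infos b ""
          if (PySem.Str.slice infographic (some 1) (some 2) == PySem.Int.toStr a) && (st.2 == true)
          then (st.1 + 1, false) else st)
        (n, true)).1 = n + (if infos.any (fun el => pvSlice el == PySem.Int.toStr a) then 1 else 0) := by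
    intro a n
    have hfun : (fun (st : Int × Bool) b =>
        let infographic := PySem.List.pyGetD infos b ""
        if (PySem.Str.slice infographic (some 1) (some 2) == PySem.Int.toStr a) && (st.2 == true)
        then (st.1 + 1, false) else st) =
      (fun (acc : Int × Bool) j => pvInner (PySem.Int.toStr a) acc (PySem.List.pyGetD infos j "")) := rfl
    rw [hfun, PySem.List.foldl_pyRange_zero_pyGetD' infos "" (pvInner (PySem.Int.toStr a)) (n, true)]
    exact pvInner_spec infos (PySem.Int.toStr a) n
  have hA : (PySem.List.pyRange 1 6 1).foldl (fun number_games a =>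
      ((PySem.List.pyRange 0 (infos.length : Int) 1).foldl
        (fun (st : Int × Bool) b =>
          let infographic := PySem.List.pyGetD infos b ""
          if (PySem.Str.slice infographic (some 1) (some 2) == PySem.Int.toStr a) && (st.2 == true)
          then (st.1 + 1, false) else st)
        (number_games, true)).1) 0 =
      ((((["1", "2", "3", "4", "5"] : List String).filter
          (fun d => infos.any (fun el => pvSlice el == d))).length : Int)) := by
    have hr : PySem.List.pyRange 1 6 1 = [1, 2, 3, 4, 5] := by decide
    rw [hr]
    simp only [List.foldl_cons, List.foldl_nil, hinner]
    rw [(by decide : PySem.Int.toStr 1 = "1"), (by decide : PySem.Int.toStr 2 = "2"),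
        (by decide : PySem.Int.toStr 3 = "3"), (by decide : PySem.Int.toStr 4 = "4"),
        (by decide : PySem.Int.toStr 5 = "5")]
    cases h1 : infos.any (fun el => pvSlice el == "1") <;>
    cases h2 : infos.any (fun el => pvSlice el == "2") <;>
    cases h3 : infos.any (fun el => pvSlice el == "3") <;>
    cases h4 : infos.any (fun el => pvSlice el == "4") <;>
    cases h5 : infos.any (fun el => pvSlice el == "5") <;>
      simp [List.filter_nil, h1, h2, h3, h4, h5]
  rw [hA]
  -- B's side: the set of seen slices is a nodup list with the same members as the filter
  have hperm : (infos.foldl (fun seen el =>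
        if (PySem.Set.ofList ["1", "2", "3", "4", "5"]).contains (pvSlice el)
        then seen.add (pvSlice el) else seen) PySem.Set.empty).Perm
      ((["1", "2", "3", "4", "5"] : List String).filter
          (fun d => infos.any (fun el => pvSlice el == d))) := by
    rw [List.perm_ext_iff_of_nodup (pvSeen_nodup infos _ (by simp [PySem.Set.empty]))
        (List.Nodup.filter _ (by decide))]
    intro y
    rw [pvSeen_mem, List.mem_filter]
    constructor
    · rintro (h0 | ⟨hD, el, hel, hsl⟩)
      · exact absurd h0 (by simp [PySem.Set.empty])
      · exact ⟨hD, List.any_eq_true.mpr ⟨el, hel, by simp [hsl]⟩⟩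
    · rintro ⟨hD, hany⟩
      rcases List.any_eq_true.mp hany with ⟨el, hel, he⟩
      exact Or.inr ⟨hD, el, hel, by simpa using he⟩
  simp only [PySem.Set.len, hperm.length_eq]

-- ===== VERDICT (by name: the statement is the Claim_ definition above) =====
theorem get_number_games_spec : Claim_equal_get_number_games := by
  intro report_info _ _
  unfold Spec_get_number_games get_number_games get_number_games_alt
  exact pvCore _
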